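-- pv_equiv track=rewrite | github.com/KearaBerlin/Crosswords | parseDictionary.py | numIntersections
-- ===== SOURCE A (Python) =====
-- def numIntersections(word1, word2):
--     wordDict = {}
--     count = 0
--     for x in range(len(word1)):
--         if word1[x] in wordDict.keys():
--             wordDict[word1[x]] += 1
--         else:
--             wordDict[word1[x]] = 1
--
--     for y in range(len(word2)):
--         if word2[y] in wordDict.keys():
--             count += wordDict[word2[y]]
--     return count
-- ===== SOURCE B (Python) =====
-- def numIntersections(word1, word2):
--     total = 0
--     for ch2 in word2:
--         for ch1 in word1:
--             if ch1 == ch2: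
--                 total += 1
--     return total
-- ===== Notes on version B (the rewrite author's own statement) =====
-- stated objective: simpler
-- what changed: B drops A's frequency dictionary entirely: it is a plain nested scan that, for each character of word2, counts equal characters by scanning word1 directly, relying on the identity sum_{y} dict[word2[y]] = sum_{y} count(word1, word2[y]).
import Mathlib
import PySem

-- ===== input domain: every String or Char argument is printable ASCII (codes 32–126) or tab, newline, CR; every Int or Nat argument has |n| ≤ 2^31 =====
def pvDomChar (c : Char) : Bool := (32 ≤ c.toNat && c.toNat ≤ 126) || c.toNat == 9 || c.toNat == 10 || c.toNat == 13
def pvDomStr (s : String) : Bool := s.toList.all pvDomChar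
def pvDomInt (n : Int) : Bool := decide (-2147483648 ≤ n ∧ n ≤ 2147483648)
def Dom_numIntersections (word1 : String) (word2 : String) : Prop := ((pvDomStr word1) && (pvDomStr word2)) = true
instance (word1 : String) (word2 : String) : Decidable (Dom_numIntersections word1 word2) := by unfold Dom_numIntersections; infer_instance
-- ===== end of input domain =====

-- B replaces A's frequency dictionary by a dict-free nested scan (simpler; not faster: O(n*m) vs O(n+m)).

-- ===== PORT A =====
-- word1[x]/word2[y] are in range (x < len), so pyGetD with a dummy default is exact here.
def numIntersections (word1 : String) (word2 : String) : Int :=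
  let wordDict : PySem.Dict Char Int :=
    (PySem.List.pyRange 0 (PySem.List.len word1.toList) 1).foldl
      (fun d x =>
        let c := PySem.List.pyGetD word1.toList x ' '
        if d.contains c then d.modify c 0 (· + 1) else d.insert c 1)
      PySem.Dict.empty
  (PySem.List.pyRange 0 (PySem.List.len word2.toList) 1).foldl
    (fun count y =>
      let c := PySem.List.pyGetD word2.toList y ' '
      if wordDict.contains c then count + wordDict.getD c 0 else count)
    0

-- ===== PORT B =====
def numIntersections_alt (word1 : String) (word2 : String) : Int :=
  word2.toList.foldl
    (fun total ch2 =>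
      word1.toList.foldl (fun t ch1 => if ch1 == ch2 then t + 1 else t) total)
    0

-- ===== PRECONDITION & SPEC =====
def Spec_numIntersections (word1 : String) (word2 : String) (out : Int) : Prop := out = numIntersections_alt word1 word2
instance (word1 : String) (word2 : String) (out : Int) : Decidable (Spec_numIntersections word1 word2 out) := by unfold Spec_numIntersections; infer_instance

-- ===== CLAIM =====
def Claim_equal_numIntersections : Prop := ∀ (word1 : String) (word2 : String), Dom_numIntersections word1 word2 → Spec_numIntersections word1 word2 (numIntersections word1 word2)

-- ===== LEMMAS AND PROOFS =====

-- A's branching build loop is the counter loop: when the key is absent, getD returns the default 0.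
lemma buildA_eq_counter (l : List Char) :
    l.foldl (fun d c => if d.contains c then d.modify c 0 (· + 1) else d.insert c 1)
      PySem.Dict.empty = PySem.Dict.counter l := by
  rw [PySem.Dict.counter_eq_foldl]
  apply PySem.List.foldl_congr_mem
  intro d c _
  by_cases h : d.contains c
  · simp [h]
  · have h0 := (PySem.Dict.get?_eq_none_iff_contains d c).2 (by simpa using h)
    have hg : d.getD c 0 = 0 := by simp [PySem.Dict.getD, h0]
    simp [h, PySem.Dict.modify, h0, hg]

-- the fully applied form of buildA_eq_counter, as it appears inside numIntersections
lemma buildA_full (w : String) :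
    List.foldl
      (fun d x =>
        if d.contains (PySem.List.pyGetD w.toList x ' ') = true then
          d.modify (PySem.List.pyGetD w.toList x ' ') 0 (· + 1)
        else d.insert (PySem.List.pyGetD w.toList x ' ') 1)
      PySem.Dict.empty (PySem.List.pyRange 0 (PySem.List.len w.toList))
      = PySem.Dict.counter w.toList := by
  rw [← buildA_eq_counter]
  exact PySem.List.foldl_pyRange_zero_pyGetD w.toList ' '
    (fun (d : PySem.Dict Char Int) c =>
      if d.contains c = true then d.modify c 0 (· + 1) else d.insert c 1)
    PySem.Dict.empty

theorem numIntersections_eq (word1 word2 : String) :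
    numIntersections word1 word2 = numIntersections_alt word1 word2 := by
  have h2 := PySem.List.foldl_pyRange_zero_pyGetD word2.toList ' '
    (fun count c => if (PySem.Dict.counter word1.toList).contains c = true then
        count + (PySem.Dict.counter word1.toList).getD c 0 else count) (0 : Int)
  simp only [numIntersections, numIntersections_alt]
  rw [buildA_full, h2]
  -- both sides become a fold over word2 adding word1's multiplicity of each character
  rw [PySem.List.foldl_congr_mem word2.toList _
        (fun acc c => acc + (word1.toList.count c : Int)) 0
        (by
          intro acc c _
          rw [PySem.Dict.contains_counter, PySem.Dict.getD_counter]
          by_cases hc : c ∈ word1.toList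
          · simp [hc]
          · simp [hc, List.count_eq_zero_of_not_mem hc])]
  exact (PySem.List.foldl_congr_mem word2.toList
    (fun total ch2 => word1.toList.foldl (fun t ch1 => if ch1 == ch2 then t + 1 else t) total)
    (fun acc c => acc + (word1.toList.count c : Int)) 0
    (by
      intro acc c _
      show word1.toList.foldl (fun t ch1 => if ch1 == c then t + 1 else t) acc
          = acc + (word1.toList.count c : Int)
      rw [PySem.List.foldl_beq_add_one])).symm

-- ===== VERDICT =====
theorem numIntersections_spec : Claim_equal_numIntersections := by
  intro w1 w2 _
  exact numIntersections_eq w1 w2
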